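-- pv_equiv track=rewrite | github.com/YoNiko2063/unified-tensor-system | tensor/bootstrap_manager.py | _categorise_links
-- ===== SOURCE A (Python) =====
-- from typing import Dict, List, Optional
--
-- def _categorise_links(
--     links: List[tuple]
-- ) -> Dict[str, List[tuple]]:
--     """Group (title, url) pairs by topic keyword matching."""
--     topic_keywords: Dict[str, List[str]] = {
--         "networking":  ["network", "tcp", "http", "dns", "ssl", "proxy"],
--         "security":    ["security", "crypto", "hack", "pentest", "vulnerability"],
--         "devops":      ["docker", "kubernetes", "ansible", "terraform", "ci"],
--         "system":      ["linux", "shell", "bash", "unix", "kernel"],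
--         "programming": ["python", "javascript", "go", "rust", "algorithm"],
--         "data":        ["database", "sql", "nosql", "redis", "postgresql"],
--     }
--     categories: Dict[str, List[tuple]] = {}
--     for title, url in links:
--         combined = (title + " " + url).lower()
--         matched  = False
--         for cat, keywords in topic_keywords.items():
--             if any(kw in combined for kw in keywords):
--                 categories.setdefault(cat, []).append((title, url))
--                 matched = True
--                 break
--         if not matched:
--             categories.setdefault("misc", []).append((title, url))
--     return categories
-- ===== SOURCE B (Python) =====
-- from typing import Dict, List
--
--
-- def _categorise_links(
--     links: List[tuple]
-- ) -> Dict[str, List[tuple]]: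
--     """Group (title, url) pairs by topic keyword matching."""
--     topic_keywords: Dict[str, List[str]] = {
--         "networking":  ["network", "tcp", "http", "dns", "ssl", "proxy"],
--         "security":    ["security", "crypto", "hack", "pentest", "vulnerability"],
--         "devops":      ["docker", "kubernetes", "ansible", "terraform", "ci"],
--         "system":      ["linux", "shell", "bash", "unix", "kernel"],
--         "programming": ["python", "javascript", "go", "rust", "algorithm"],
--         "data":        ["database", "sql", "nosql", "redis", "postgresql"],
--     }
--     # Inverted loop nesting: one pass per category over the still-unlabelled
--     # link indices, then one grouping pass over the links in input order.
--     combined = [(title + " " + url).lower() for title, url in links]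
--     labels = ["misc"] * len(links)
--     remaining = list(range(len(links)))
--     for cat, keywords in topic_keywords.items():
--         still = []
--         for i in remaining:
--             if any(kw in combined[i] for kw in keywords):
--                 labels[i] = cat
--             else:
--                 still.append(i)
--         remaining = still
--     categories: Dict[str, List[tuple]] = {}
--     for (title, url), lab in zip(links, labels):
--         categories.setdefault(lab, []).append((title, url))
--     return categories
-- ===== Notes on version B (the rewrite author's own statement) =====
-- stated objective: alternative
-- what changed: B inverts the loop nesting: instead of A's link-outer loop with a first-match inner scan over the category dict (matched flag + break), B makes one pass per category over a shrinking list of still-unlabelled link indices to compute a label per link, then groups the links by label in a final pass.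
import Mathlib
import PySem

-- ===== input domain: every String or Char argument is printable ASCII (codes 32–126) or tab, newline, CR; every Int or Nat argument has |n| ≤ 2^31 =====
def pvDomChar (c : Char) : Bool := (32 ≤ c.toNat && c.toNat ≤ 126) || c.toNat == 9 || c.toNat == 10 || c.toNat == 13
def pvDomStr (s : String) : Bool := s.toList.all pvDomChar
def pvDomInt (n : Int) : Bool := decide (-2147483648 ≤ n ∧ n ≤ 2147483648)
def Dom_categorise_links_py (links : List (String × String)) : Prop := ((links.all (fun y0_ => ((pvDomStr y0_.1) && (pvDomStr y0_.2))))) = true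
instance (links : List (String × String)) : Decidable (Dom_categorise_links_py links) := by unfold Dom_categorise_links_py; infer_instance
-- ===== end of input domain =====

-- B inverts the loop nesting: one pass per category over the still-unlabelled link indices
-- computes a label per link, then one grouping pass builds the dict; objective: alternative.

-- ===== PORT A =====
-- the literal topic_keywords dict, as its items list (shared constant of both sources)
def pvTopicKeywords : List (String × List String) :=
  [("networking",  ["network", "tcp", "http", "dns", "ssl", "proxy"]),
   ("security",    ["security", "crypto", "hack", "pentest", "vulnerability"]),
   ("devops",      ["docker", "kubernetes", "ansible", "terraform", "ci"]),
   ("system",      ["linux", "shell", "bash", "unix", "kernel"]),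
   ("programming", ["python", "javascript", "go", "rust", "algorithm"]),
   ("data",        ["database", "sql", "nosql", "redis", "postgresql"])]

-- A's inner 'for cat, keywords ... break' loop, including the 'if not matched' tail;
-- setdefault(cat, []).append(x) is Dict.modify cat [] (· ++ [x])
def pvInnerA (combined : List Char) (title url : String)
    (cats : PySem.Dict String (List (String × String))) :
    List (String × List String) → PySem.Dict String (List (String × String))
  | [] => cats.modify "misc" [] (· ++ [(title, url)])
  | (cat, kws) :: rest =>
      if kws.any (fun kw => PySem.Chars.isIn kw.toList combined) then
        cats.modify cat [] (· ++ [(title, url)])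
      else
        pvInnerA combined title url cats rest

def pvStepA (cats : PySem.Dict String (List (String × String))) (link : String × String) :
    PySem.Dict String (List (String × String)) :=
  let combined := PySem.Chars.lower (link.1.toList ++ ' ' :: link.2.toList)
  pvInnerA combined link.1 link.2 cats pvTopicKeywords

def categorise_links_py (links : List (String × String)) : List (String × List (String × String)) :=
  (links.foldl pvStepA PySem.Dict.empty).items

-- ===== PORT B =====
-- one category pass: for i in remaining: if any kw in combined[i]: labels[i]=cat else still.append(i)
def pvCatPass (combined : List (List Char)) (cat : String) (kws : List String)
    (labels : List String) (remaining : List Nat) : List String × List Nat :=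
  remaining.foldl
    (fun st i =>
      if kws.any (fun kw => PySem.Chars.isIn kw.toList (combined.getD i [])) then
        (st.1.set i cat, st.2)          -- combined[i] always in range: i comes from range(len links)
      else
        (st.1, st.2 ++ [i]))
    (labels, [])

def categorise_links_py_alt (links : List (String × String)) : List (String × List (String × String)) :=
  let combined := links.map (fun l => PySem.Chars.lower (l.1.toList ++ ' ' :: l.2.toList))
  let st := pvTopicKeywords.foldl
    (fun st p => pvCatPass combined p.1 p.2 st.1 st.2)
    (List.replicate links.length "misc", List.range links.length)
  ((links.zip st.1).foldl
    (fun cats q => cats.modify q.2 [] (· ++ [q.1]))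
    PySem.Dict.empty).items

-- ===== PRECONDITION & SPEC =====
def Spec_categorise_links_py (links : List (String × String)) (out : List (String × List (String × String))) : Prop := out = categorise_links_py_alt links
instance (links : List (String × String)) (out : List (String × List (String × String))) : Decidable (Spec_categorise_links_py links out) := by unfold Spec_categorise_links_py; infer_instance

-- ===== CLAIM (what is proved, stated in full; the proofs are below) =====
def Claim_equal_categorise_links_py : Prop := ∀ (links : List (String × String)), Dom_categorise_links_py links → Spec_categorise_links_py links (categorise_links_py links)

-- ===== LEMMAS AND PROOFS =====

-- first matching category (and its name) for a combined string, over a category list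
def pvFirstCat (combined : List Char) : List (String × List String) → Option String
  | [] => none
  | (cat, kws) :: rest =>
      if kws.any (fun kw => PySem.Chars.isIn kw.toList combined) then some cat
      else pvFirstCat combined rest

def pvCatOf (l : String × String) : String :=
  (pvFirstCat (PySem.Chars.lower (l.1.toList ++ ' ' :: l.2.toList)) pvTopicKeywords).getD "misc"

-- A's inner loop is one modify at the first matching category (default "misc")
lemma pvInnerA_eq_modify (L : List (String × List String)) (combined : List Char)
    (title url : String) (cats : PySem.Dict String (List (String × String))) :
    pvInnerA combined title url cats L
      = cats.modify ((pvFirstCat combined L).getD "misc") [] (· ++ [(title, url)]) := by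
  induction L with
  | nil => simp [pvInnerA, pvFirstCat]
  | cons p rest ih =>
      obtain ⟨cat, kws⟩ := p
      simp only [pvInnerA, pvFirstCat]
      by_cases h : kws.any (fun kw => PySem.Chars.isIn kw.toList combined) = true <;> simp [h, ih]

-- the two components of pvCatPass's fold, separated
lemma pvCatPass_fst_aux (combined : List (List Char)) (cat : String) (kws : List String)
    (remaining : List Nat) (labels : List String) (acc : List Nat) :
    (remaining.foldl
      (fun st i =>
        if kws.any (fun kw => PySem.Chars.isIn kw.toList (combined.getD i [])) then
          (st.1.set i cat, st.2)
        else
          (st.1, st.2 ++ [i]))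
      ((labels, acc) : List String × List Nat)).1
      = remaining.foldl
          (fun lb i =>
            if kws.any (fun kw => PySem.Chars.isIn kw.toList (combined.getD i [])) then
              lb.set i cat else lb) labels := by
  induction remaining generalizing labels acc with
  | nil => rfl
  | cons i rs ih =>
      simp only [List.foldl_cons]
      by_cases h : kws.any (fun kw => PySem.Chars.isIn kw.toList (combined.getD i [])) = true
      · rw [if_pos h, if_pos h]; exact ih _ _
      · rw [if_neg h, if_neg h]; exact ih _ _

lemma pvCatPass_fst (combined : List (List Char)) (cat : String) (kws : List String)
    (labels : List String) (remaining : List Nat) :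
    (pvCatPass combined cat kws labels remaining).1
      = remaining.foldl
          (fun lb i =>
            if kws.any (fun kw => PySem.Chars.isIn kw.toList (combined.getD i [])) then
              lb.set i cat else lb) labels := by
  unfold pvCatPass
  exact pvCatPass_fst_aux combined cat kws remaining labels []

lemma pvCatPass_snd_aux (combined : List (List Char)) (cat : String) (kws : List String)
    (remaining : List Nat) (labels : List String) (acc : List Nat) :
    (remaining.foldl
      (fun st i =>
        if kws.any (fun kw => PySem.Chars.isIn kw.toList (combined.getD i [])) then
          (st.1.set i cat, st.2)
        else
          (st.1, st.2 ++ [i]))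
      ((labels, acc) : List String × List Nat)).2
      = acc ++ remaining.filter
          (fun i => !(kws.any (fun kw => PySem.Chars.isIn kw.toList (combined.getD i [])))) := by
  induction remaining generalizing labels acc with
  | nil => simp
  | cons i rs ih =>
      simp only [List.foldl_cons, List.filter_cons]
      by_cases h : kws.any (fun kw => PySem.Chars.isIn kw.toList (combined.getD i [])) = true
      · rw [if_pos h]
        simp only [h, Bool.not_true, Bool.false_eq_true, if_false]
        exact ih _ _
      · rw [if_neg h]
        simp only [Bool.not_eq_true] at h
        simp only [h, Bool.not_false, if_true]
        rw [ih _ _]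
        simp

lemma pvCatPass_snd (combined : List (List Char)) (cat : String) (kws : List String)
    (labels : List String) (remaining : List Nat) :
    (pvCatPass combined cat kws labels remaining).2
      = remaining.filter
          (fun i => !(kws.any (fun kw => PySem.Chars.isIn kw.toList (combined.getD i [])))) := by
  unfold pvCatPass
  simpa using pvCatPass_snd_aux combined cat kws remaining labels []

-- setting an index not in rs commutes past a fold of conditional sets over rs
lemma pvSet_comm_foldl (rs : List Nat) (P : Nat → Bool) (v : Nat → String)
    (lb : List String) (i : Nat) (w : String) (hi : i ∉ rs) :
    (rs.foldl (fun lb j => if P j then lb.set j (v j) else lb) lb).set i w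
      = rs.foldl (fun lb j => if P j then lb.set j (v j) else lb) (lb.set i w) := by
  induction rs generalizing lb with
  | nil => rfl
  | cons j rs ih =>
      have hij : i ≠ j := fun h => hi (h ▸ List.mem_cons_self)
      have hi' : i ∉ rs := fun h => hi (List.mem_cons_of_mem _ h)
      simp only [List.foldl_cons]
      by_cases h : P j = true
      · rw [if_pos h, if_pos h, ih _ hi', List.set_comm (v j) w hij.symm]
      · rw [if_neg h, if_neg h, ih _ hi']

-- interleaving: one category pass followed by later passes over the survivors equals
-- one combined pass choosing the first matching category
lemma pvInterleave (b : Nat → Bool) (cat : String) (FC : Nat → Option String)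
    (remaining : List Nat) (hnd : remaining.Nodup) (labels : List String) :
    (remaining.filter (fun i => !b i)).foldl
        (fun lb i => match FC i with | some c => lb.set i c | none => lb)
        (remaining.foldl (fun lb i => if b i then lb.set i cat else lb) labels)
      = remaining.foldl
          (fun lb i =>
            match (if b i then some cat else FC i) with
            | some c => lb.set i c | none => lb) labels := by
  induction remaining generalizing labels with
  | nil => rfl
  | cons i rs ih =>
      have hi : i ∉ rs := (List.nodup_cons.mp hnd).1
      have hnd' : rs.Nodup := (List.nodup_cons.mp hnd).2
      simp only [List.foldl_cons, List.filter_cons]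
      by_cases h : b i = true
      · simp only [h, Bool.not_true, if_true, Bool.false_eq_true, if_false]
        exact ih hnd' (labels.set i cat)
      · have h' : b i = false := by simpa using h
        simp only [h', Bool.not_false, if_true, Bool.false_eq_true, if_false,
          List.foldl_cons]
        have hcomm :
            (match FC i with
              | some c =>
                  (rs.foldl (fun lb j => if b j = true then lb.set j cat else lb) labels).set i c
              | none => rs.foldl (fun lb j => if b j = true then lb.set j cat else lb) labels)
            = rs.foldl (fun lb j => if b j = true then lb.set j cat else lb)
                (match FC i with
                  | some c => labels.set i c
                  | none => labels) := by
          cases FC i with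
          | none => rfl
          | some c => exact pvSet_comm_foldl rs b (fun _ => cat) labels i c hi
        rw [hcomm]
        exact ih hnd' _

-- unfolding pvFirstCat at a cons cell
lemma pvFirstCat_cons (combined : List Char) (cat : String) (kws : List String)
    (rest : List (String × List String)) :
    pvFirstCat combined ((cat, kws) :: rest)
      = if kws.any (fun kw => PySem.Chars.isIn kw.toList combined) then some cat
        else pvFirstCat combined rest := rfl

-- the outer category fold computes, for every index, its first matching category
lemma pvPassAll_fst (combined : List (List Char)) (L : List (String × List String))
    (labels : List String) (remaining : List Nat) (hnd : remaining.Nodup) :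
    (L.foldl (fun st p => pvCatPass combined p.1 p.2 st.1 st.2) (labels, remaining)).1
      = remaining.foldl
          (fun lb i =>
            match pvFirstCat (combined.getD i []) L with
            | some cat => lb.set i cat
            | none => lb) labels := by
  induction L generalizing labels remaining with
  | nil => simp only [List.foldl_nil, pvFirstCat]; exact (List.foldl_fixed remaining).symm
  | cons p rest ih =>
      obtain ⟨cat, kws⟩ := p
      simp only [List.foldl_cons]
      rw [ih _ _ ((pvCatPass_snd combined cat kws labels remaining) ▸ hnd.filter _),
          pvCatPass_fst, pvCatPass_snd]
      simp only [pvFirstCat_cons]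
      exact pvInterleave
        (fun i => kws.any (fun kw => PySem.Chars.isIn kw.toList (combined.getD i [])))
        cat (fun i => pvFirstCat (combined.getD i []) rest) remaining hnd labels

-- length is preserved by a fold of conditional sets
lemma pvFoldSet_length (xs : List Nat) (F : Nat → Option String) (lb : List String) :
    (xs.foldl (fun lb i => match F i with | some c => lb.set i c | none => lb) lb).length
      = lb.length := by
  induction xs generalizing lb with
  | nil => rfl
  | cons i rs ih =>
      simp only [List.foldl_cons]
      cases hF : F i with
      | none => simp [hF, ih]
      | some c => simp [hF, ih]

-- a fold of conditional sets, read back pointwise (via getD to avoid proof-dependent indices)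
lemma pvFoldSet_getD (xs : List Nat) (F : Nat → Option String) (lb : List String) (j : Nat)
    (hx : ∀ i ∈ xs, i < lb.length) :
    (xs.foldl (fun lb i => match F i with | some c => lb.set i c | none => lb) lb).getD j ""
      = if j ∈ xs then (match F j with | some c => c | none => lb.getD j "") else lb.getD j "" := by
  induction xs generalizing lb with
  | nil => simp
  | cons i rs ih =>
      have hi : i < lb.length := hx i List.mem_cons_self
      have hx' : ∀ k ∈ rs, k < lb.length := fun k hk => hx k (List.mem_cons_of_mem _ hk)
      simp only [List.foldl_cons, List.mem_cons]
      cases hF : F i with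
      | none =>
          simp only [hF]
          rw [ih lb hx']
          by_cases hij : j = i
          · subst hij
            by_cases hmem : j ∈ rs <;> simp [hmem, hF]
          · by_cases hmem : j ∈ rs <;> simp [hmem, hij]
      | some c =>
          simp only [hF]
          rw [ih (lb.set i c) (fun k hk => by simpa using hx' k hk)]
          by_cases hij : j = i
          · subst hij
            have hset : (lb.set j c)[j]?.getD "" = c := by
              rw [List.getElem?_set_self] <;> simp [hi]
            by_cases hmem : j ∈ rs <;> simp [hmem, hF, hset]
          · have hset : (lb.set i c)[j]?.getD "" = lb[j]?.getD "" := by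
              rw [List.getElem?_set_ne (fun h => hij h.symm)]
            by_cases hmem : j ∈ rs <;> simp [hmem, hij, hset]

-- the labels computed by B are exactly pvCatOf, link by link
lemma pvLabels_eq (links : List (String × String)) :
    (pvTopicKeywords.foldl
      (fun st p => pvCatPass (links.map (fun l => PySem.Chars.lower (l.1.toList ++ ' ' :: l.2.toList))) p.1 p.2 st.1 st.2)
      (List.replicate links.length "misc", List.range links.length)).1
      = links.map pvCatOf := by
  set combined := links.map (fun l => PySem.Chars.lower (l.1.toList ++ ' ' :: l.2.toList)) with hc
  rw [pvPassAll_fst combined pvTopicKeywords _ _ (List.nodup_range)]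
  apply List.ext_getElem
  · simp [pvFoldSet_length]
  · intro j hj hj'
    have hjn : j < links.length := by simpa using hj'
    rw [← List.getD_eq_getElem _ "" hj, ← List.getD_eq_getElem _ "" hj']
    rw [pvFoldSet_getD (List.range links.length)
        (fun i => pvFirstCat (combined.getD i []) pvTopicKeywords)
        (List.replicate links.length "misc") j
        (fun i hi => by simpa using List.mem_range.mp hi)]
    have hmem : j ∈ List.range links.length := List.mem_range.mpr hjn
    have hcj : combined.getD j []
        = PySem.Chars.lower (links[j].1.toList ++ ' ' :: links[j].2.toList) := by
      rw [hc, List.getD_eq_getElem _ _ (by simpa using hjn)]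
      simp
    simp only [hmem, hcj]
    cases hfc : pvFirstCat (PySem.Chars.lower (links[j].1.toList ++ ' ' :: links[j].2.toList)) pvTopicKeywords with
    | none => simp [hjn, pvCatOf, hfc]
    | some c => simp [hjn, pvCatOf, hfc]

-- ===== VERDICT (by name: the statement is the Claim_ definition above) =====
theorem categorise_links_py_spec : Claim_equal_categorise_links_py := by
  intro links _
  unfold Spec_categorise_links_py
  simp only [categorise_links_py, categorise_links_py_alt]
  rw [pvLabels_eq, ← List.map_prod_left_eq_zip, List.foldl_map]
  have hstep : pvStepA = fun (cats : PySem.Dict String (List (String × String)))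
      (link : String × String) =>
      cats.modify (link, pvCatOf link).2 [] (· ++ [(link, pvCatOf link).1]) := by
    funext cats link
    simp [pvStepA, pvInnerA_eq_modify, pvCatOf]
  rw [hstep]
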